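-- pv_equiv track=rewrite | github.com/JudyHsiao/codejam | burger.py | burger_opt
-- ===== SOURCE A (Python) =====
-- def cal_err(dist, opt):
--     err = 0
--     for i in range(len(dist)):
--         err += (dist[i]-opt[i])**2
--     return err
--
-- def burger_opt(k, opt):
--     dist = [0]*k
--
--     rank=[]
--     for i in range(k):
--         rank.append((opt[i], i))  # 0 2 1 1 2  => [(0,0) ,(2,1) , (1,2) , (1,3), (2,4) ]
--
--     rank.sort()  # [(0,0), (1,2) , (1,3), (2,4) ,(2,1) ]
--
--     j = 0
--     for i in range(k//2):
--         idx = rank[j][1]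
--         dist[idx] = i
--         j += 1
--         idx = rank[j][1]
--         dist[idx] = i
--         j += 1
--
--     if j < k:
--         idx = rank[j][1]
--         dist[idx] = (k-1)//2
--
--     err = cal_err(dist, opt)
--
--     return err
-- ===== SOURCE B (Python) =====
-- def _halves(m):
--     # sum of j//2 for j in range(m), closed form
--     q = m // 2
--     return q * (m - q - 1)
--
-- def _sq_halves(m):
--     # sum of (j//2)**2 for j in range(m), closed form (the //3 is exact)
--     q = m // 2
--     return (q - 1) * q * (2 * q - 1) // 3 + (m - 2 * q) * q * q
--
-- def burger_opt(k, opt):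
--     cnt = {}
--     for v in opt[:max(0, k)]:
--         cnt[v] = cnt.get(v, 0) + 1
--     err = 0
--     p = 0
--     for v in sorted(cnt):
--         c = cnt[v]
--         err += c * v * v - 2 * v * (_halves(p + c) - _halves(p)) + _sq_halves(p + c) - _sq_halves(p)
--         p += c
--     return err
-- ===== Notes on version B (the rewrite author's own statement) =====
-- stated objective: alternative
-- what changed: B never sorts the k elements or builds a dist array/permutation: it builds a value-to-count dictionary over the first k values, walks only the sorted DISTINCT values, and adds each equal-value group's squared error in closed form via arithmetic-series formulas for sum(j//2) and sum((j//2)**2), trading A's per-element scatter-and-rescan for counting plus O(u log u) grouped arithmetic.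
import Mathlib
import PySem

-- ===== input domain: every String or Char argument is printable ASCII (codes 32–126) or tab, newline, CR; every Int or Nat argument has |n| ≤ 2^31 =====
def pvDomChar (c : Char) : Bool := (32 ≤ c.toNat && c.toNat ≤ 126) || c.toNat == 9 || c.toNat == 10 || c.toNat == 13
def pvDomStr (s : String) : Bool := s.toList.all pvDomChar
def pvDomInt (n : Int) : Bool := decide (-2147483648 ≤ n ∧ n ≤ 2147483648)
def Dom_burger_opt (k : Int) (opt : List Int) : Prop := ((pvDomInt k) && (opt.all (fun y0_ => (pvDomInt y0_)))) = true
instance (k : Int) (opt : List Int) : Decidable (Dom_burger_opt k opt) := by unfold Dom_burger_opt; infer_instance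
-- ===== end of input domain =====

-- B replaces A's sort of the k elements, permutation bookkeeping and dist array by a value→count
-- dictionary plus closed-form group sums over the sorted distinct values (objective: alternative).

-- ===== PORT A =====
-- helper cal_err: err += (dist[i]-opt[i])**2 over range(len(dist)); pyGetD default 0 is only read
-- when the index is out of range, which Pre_ excludes.
def cal_err (dist opt : List Int) : Int :=
  (PySem.List.pyRange 0 (PySem.List.len dist) 1).foldl
    (fun err i => err + (PySem.List.pyGetD dist i 0 - PySem.List.pyGetD opt i 0) ^ 2) 0

def burger_opt (k : Int) (opt : List Int) : Int :=
  let dist := PySem.List.pyRepeat [(0 : Int)] k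
  let rank := (PySem.List.pyRange 0 k 1).foldl
      (fun r i => r ++ [(PySem.List.pyGetD opt i 0, i)]) ([] : List (Int × Int))
  let rank := PySem.List.sorted2 rank (fun p => p.1) (fun p => p.2) false
  let st := (PySem.List.pyRange 0 (PySem.Int.floordiv k 2) 1).foldl
      (fun (st : List Int × Int) i =>
        let idx := (PySem.List.pyGetD rank st.2 (0, 0)).2
        let dist := PySem.List.pySetD st.1 idx i
        let j := st.2 + 1
        let idx := (PySem.List.pyGetD rank j (0, 0)).2
        let dist := PySem.List.pySetD dist idx i
        (dist, j + 1)) (dist, (0 : Int))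
  let dist := if st.2 < k then
      PySem.List.pySetD st.1 (PySem.List.pyGetD rank st.2 (0, 0)).2 (PySem.Int.floordiv (k - 1) 2)
    else st.1
  cal_err dist opt

-- ===== PORT B =====
-- _halves(m) = sum of j//2 for j in range(m), _sq_halves(m) = sum of (j//2)**2, closed forms
def pvHalves (m : Int) : Int :=
  let q := PySem.Int.floordiv m 2
  q * (m - q - 1)

def pvSqHalves (m : Int) : Int :=
  let q := PySem.Int.floordiv m 2
  PySem.Int.floordiv ((q - 1) * q * (2 * q - 1)) 3 + (m - 2 * q) * q * q

def burger_opt_alt (k : Int) (opt : List Int) : Int :=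
  let cnt := (PySem.List.slice opt none (some (max 0 k))).foldl
      (fun (d : PySem.Dict Int Int) v => d.insert v (d.getD v 0 + 1)) PySem.Dict.empty
  let st := (PySem.List.sorted (PySem.Dict.keys cnt) (fun x => x) false).foldl
      (fun (st : Int × Int) v =>
        let c := cnt.getD v 0   -- Python cnt[v]; v is a key of cnt, so the default is never read
        (st.1 + c * v * v - 2 * v * (pvHalves (st.2 + c) - pvHalves st.2)
            + pvSqHalves (st.2 + c) - pvSqHalves st.2,
         st.2 + c)) ((0 : Int), (0 : Int))
  st.1

-- ===== PRECONDITION & SPEC =====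
-- A raises IndexError (at opt[i]) exactly when k > len(opt); nothing else is excluded.
def Pre_burger_opt (k : Int) (opt : List Int) : Prop := k ≤ PySem.List.len opt
instance (k : Int) (opt : List Int) : Decidable (Pre_burger_opt k opt) := by unfold Pre_burger_opt; infer_instance
def pvWitness_burger_opt : Int × List Int := (3, [0, 2, 1])

def Spec_burger_opt (k : Int) (opt : List Int) (out : Int) : Prop := out = burger_opt_alt k opt
instance (k : Int) (opt : List Int) (out : Int) : Decidable (Spec_burger_opt k opt out) := by unfold Spec_burger_opt; infer_instance

-- ===== CLAIM (what is proved, stated in full; the proofs are below) =====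
def Claim_equal_burger_opt : Prop := ∀ (k : Int) (opt : List Int), Dom_burger_opt k opt → Pre_burger_opt k opt → Spec_burger_opt k opt (burger_opt k opt)

-- ===== LEMMAS AND PROOFS =====

lemma pv_pyRange_neg (k : Int) (h : k < 0) : PySem.List.pyRange 0 k 1 = [] := by
  simp [PySem.List.pyRange]; omega

lemma pv_map_getD_range {α β : Type} (l : List α) (d : α) (f : α → β) :
    (List.range l.length).map (fun p => f (l.getD p d)) = l.map f := by
  apply List.ext_getElem
  · simp
  · intro i h1 h2
    simp only [List.getElem_map, List.getElem_range]
    rw [List.getD_eq_getElem?_getD, List.getElem?_eq_getElem (by simpa using h2)]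
    rfl

lemma pv_take_eq_map_getD (opt : List Int) (n : Nat) (h : n ≤ opt.length) :
    (List.range n).map (fun j => opt.getD j 0) = opt.take n := by
  apply List.ext_getElem
  · simp; omega
  · intro i h1 h2
    simp only [List.getElem_map, List.getElem_range, List.getElem_take]
    rw [List.getD_eq_getElem?_getD, List.getElem?_eq_getElem (by simp at h1; omega)]
    rfl

lemma pv_getD_set (l : List Int) (i j : Nat) (a d : Int) (hj : j < l.length) :
    (l.set i a).getD j d = if i = j then a else l.getD j d := by
  rw [List.getD_eq_getElem?_getD, List.getElem?_set]
  split
  · rename_i h; simp [h ▸ hj]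
  · rw [List.getD_eq_getElem?_getD]

lemma pv_sorted2_lex {α : Type} (xs : List α) (k1 k2 : α → Int) :
    PySem.List.sorted2 xs k1 k2 false = PySem.List.sorted xs (fun x => toLex (k1 x, k2 x)) false := by
  have h : (fun (a b : α) => decide (k1 a < k1 b) || (!decide (k1 b < k1 a) && decide (k2 a < k2 b)))
         = (fun (a b : α) => decide (toLex (k1 a, k2 a) < toLex (k1 b, k2 b))) := by
    funext a b
    rcases lt_trichotomy (k1 a) (k1 b) with h | h | h <;>
      simp [Prod.Lex.lt_iff, h] <;> omega
  show List.foldl (fun acc x => PySem.List.insertBy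
      (fun a b => decide (k1 a < k1 b) || (!decide (k1 b < k1 a) && decide (k2 a < k2 b))) x acc) [] xs = _
  rw [PySem.List.sorted_eq_foldl_insertBy, h]

lemma pv_sum_set (n : Nat) (opt l : List Int) (i : Nat) (hi : i < n) (hl : l.length = n) (a : Int) :
    ((List.range n).map (fun j => ((l.set i a).getD j 0 - opt.getD j 0) ^ 2)).sum
      = ((List.range n).map (fun j => (l.getD j 0 - opt.getD j 0) ^ 2)).sum
        - (l.getD i 0 - opt.getD i 0) ^ 2 + (a - opt.getD i 0) ^ 2 := by
  have hb : ∀ (g : Nat → Int), ((List.range n).map g).sum = ∑ j ∈ Finset.range n, g j :=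
    fun g => rfl
  rw [hb, hb]
  have hmem : i ∈ Finset.range n := Finset.mem_range.mpr hi
  rw [← Finset.add_sum_erase _ _ hmem, ← Finset.add_sum_erase _ _ hmem]
  have herase : ∑ j ∈ (Finset.range n).erase i, ((l.set i a).getD j 0 - opt.getD j 0) ^ 2
       = ∑ j ∈ (Finset.range n).erase i, (l.getD j 0 - opt.getD j 0) ^ 2 := by
    apply Finset.sum_congr rfl
    intro j hj
    have hj2 : j < l.length := by
      have := Finset.mem_range.mp (Finset.mem_of_mem_erase hj); omega
    rw [pv_getD_set l i j a 0 hj2, if_neg (Ne.symm (Finset.ne_of_mem_erase hj))]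
  rw [herase, pv_getD_set l i i a 0 (by omega), if_pos rfl]
  ring

lemma pv_foldl_set_length : ∀ (v : List (Nat × Int)) (d : List Int),
    (v.foldl (fun d q => d.set q.1 q.2) d).length = d.length := by
  intro v
  induction v with
  | nil => intro d; rfl
  | cons q v ih => intro d; simp [List.foldl_cons, ih, List.length_set]

lemma pv_scatter (opt : List Int) (n : Nat) :
    ∀ (v : List (Nat × Int)) (d : List Int), d.length = n →
    (v.map Prod.fst).Nodup → (∀ q ∈ v, q.1 < n ∧ d.getD q.1 0 = 0) →
    ((List.range n).map
        (fun i => ((v.foldl (fun d q => d.set q.1 q.2) d).getD i 0 - opt.getD i 0) ^ 2)).sum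
      = ((List.range n).map (fun i => (d.getD i 0 - opt.getD i 0) ^ 2)).sum
        + (v.map (fun q => (q.2 - opt.getD q.1 0) ^ 2 - (opt.getD q.1 0) ^ 2)).sum := by
  intro v
  induction v with
  | nil => intro d _ _ _; simp
  | cons q v ih =>
    intro d hlen hnd hcond
    have hq := hcond q (List.mem_cons_self)
    rw [List.map_cons] at hnd
    have hnd' := List.nodup_cons.mp hnd
    have step : ∀ q' ∈ v, q'.1 < n ∧ (d.set q.1 q.2).getD q'.1 0 = 0 := by
      intro q' hq'
      have h1 := (hcond q' (List.mem_cons_of_mem _ hq')).1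
      have h2 := (hcond q' (List.mem_cons_of_mem _ hq')).2
      refine ⟨h1, ?_⟩
      rw [pv_getD_set d q.1 q'.1 q.2 0 (by omega), if_neg, h2]
      intro hcontra
      exact hnd'.1 (hcontra ▸ List.mem_map_of_mem hq')
    rw [List.foldl_cons, ih (d.set q.1 q.2) (by simp [hlen]) hnd'.2 step,
        pv_sum_set n opt d q.1 hq.1 hlen q.2, hq.2]
    simp only [List.map_cons, List.sum_cons]
    ring

-- unrolling of A's pair loop: after m iterations j = 2*m and the first 2*m sorted positions
-- have been scattered; r's second components are the (nonnegative) original indices.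
lemma pv_loop (r : List (Int × Int)) (hsnd : ∀ q ∈ r, 0 ≤ q.2) :
    ∀ (m : Nat) (d0 : List Int), 2 * m ≤ r.length →
    (List.range m).foldl
      (fun (st : List Int × Int) (i : Nat) =>
        (PySem.List.pySetD
            (PySem.List.pySetD st.1 (PySem.List.pyGetD r st.2 (0, 0)).2 (i : Int))
            (PySem.List.pyGetD r (st.2 + 1) (0, 0)).2 (i : Int),
          st.2 + 1 + 1)) (d0, 0)
    = ((List.range (2 * m)).foldl
        (fun d p => d.set (r.getD p (0, 0)).2.toNat ((p / 2 : Nat) : Int)) d0,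
       ((2 * m : Nat) : Int)) := by
  intro m
  induction m with
  | zero => intro d0 _; simp
  | succ m ih =>
    intro d0 hm
    rw [List.range_succ, List.foldl_append, ih d0 (by omega), List.foldl_cons, List.foldl_nil]
    have h2m : 2 * m < r.length := by omega
    have h2m1 : 2 * m + 1 < r.length := by omega
    have hg1 : PySem.List.pyGetD r ((2 * m : Nat) : Int) (0, 0) = r.getD (2 * m) (0, 0) :=
      PySem.List.pyGetD_natCast r (2 * m) (0, 0)
    have hcast : ((2 * m : Nat) : Int) + 1 = ((2 * m + 1 : Nat) : Int) := by push_cast; ring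
    have hg2 : PySem.List.pyGetD r (((2 * m : Nat) : Int) + 1) (0, 0) = r.getD (2 * m + 1) (0, 0) := by
      rw [hcast]; exact PySem.List.pyGetD_natCast r (2 * m + 1) (0, 0)
    have hmem1 : r.getD (2 * m) (0, 0) ∈ r := by
      rw [List.getD_eq_getElem?_getD, List.getElem?_eq_getElem h2m]; exact List.getElem_mem _
    have hmem2 : r.getD (2 * m + 1) (0, 0) ∈ r := by
      rw [List.getD_eq_getElem?_getD, List.getElem?_eq_getElem h2m1]; exact List.getElem_mem _
    simp only [hg1, hg2]
    rw [PySem.List.pySetD_of_nonneg _ _ (hsnd _ hmem1), PySem.List.pySetD_of_nonneg _ _ (hsnd _ hmem2)]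
    have hr : 2 * (m + 1) = (2 * m + 1) + 1 := by ring
    rw [hr, List.range_succ, List.range_succ, List.foldl_append, List.foldl_append,
        List.foldl_cons, List.foldl_nil, List.foldl_cons, List.foldl_nil]
    have hv1 : ((2 * m / 2 : Nat) : Int) = (m : Int) := by
      norm_num
    have hv2 : (((2 * m + 1) / 2 : Nat) : Int) = (m : Int) := by
      have : (2 * m + 1) / 2 = m := by omega
      rw [this]
    rw [hv1, hv2]
    simp only [Prod.mk.injEq]
    exact ⟨trivial, by push_cast; ring⟩

-- ---- closed forms for the B side ----

lemma pv_halves_closed (m : Nat) :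
    pvHalves (m : Int) = ∑ j ∈ Finset.range m, ((j / 2 : Nat) : Int) := by
  induction m with
  | zero => simp [pvHalves, PySem.Int.floordiv]
  | succ m ih =>
    rw [Finset.sum_range_succ, ← ih]
    simp only [pvHalves]
    rw [show PySem.Int.floordiv ((m : Nat) : Int) 2 = (((m / 2 : Nat)) : Int) from
          by exact_mod_cast PySem.Int.floordiv_natCast m 2,
        show PySem.Int.floordiv ((m + 1 : Nat) : Int) 2 = ((((m + 1) / 2 : Nat)) : Int) from
          by exact_mod_cast PySem.Int.floordiv_natCast (m + 1) 2]
    rcases Nat.even_or_odd m with ⟨t, ht⟩ | ⟨t, ht⟩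
    · have h1 : m / 2 = t := by omega
      have h2 : (m + 1) / 2 = t := by omega
      subst ht
      rw [h1, h2]
      push_cast
      ring
    · have h1 : m / 2 = t := by omega
      have h2 : (m + 1) / 2 = t + 1 := by omega
      subst ht
      rw [h1, h2]
      push_cast
      ring

lemma pv_six (t : Nat) :
    ((t : Int) - 1) * t * (2 * t - 1) = 3 * (2 * ∑ i ∈ Finset.range t, (i : Int) ^ 2) := by
  induction t with
  | zero => simp
  | succ t ih =>
    rw [Finset.sum_range_succ]
    push_cast
    push_cast at ih
    nlinarith [ih]

lemma pv_sqhalves_eval (t : Nat) (m : Int) (h : PySem.Int.floordiv m 2 = (t : Int)) :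
    pvSqHalves m = 2 * (∑ i ∈ Finset.range t, (i : Int) ^ 2) + (m - 2 * t) * t * t := by
  simp only [pvSqHalves, h]
  rw [pv_six t, PySem.Int.floordiv_eq_ediv_of_pos (by omega),
      Int.mul_ediv_cancel_left _ (by omega : (3 : Int) ≠ 0)]

lemma pv_sqhalves_closed (m : Nat) :
    pvSqHalves (m : Int) = ∑ j ∈ Finset.range m, ((j / 2 : Nat) : Int) ^ 2 := by
  induction m with
  | zero =>
    rw [Nat.cast_zero, pv_sqhalves_eval 0 0 (by decide)]
    simp
  | succ m ih =>
    have he : PySem.Int.floordiv ((m : Nat) : Int) 2 = ((m / 2 : Nat) : Int) := by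
      exact_mod_cast PySem.Int.floordiv_natCast m 2
    have he1 : PySem.Int.floordiv ((m + 1 : Nat) : Int) 2 = (((m + 1) / 2 : Nat) : Int) := by
      exact_mod_cast PySem.Int.floordiv_natCast (m + 1) 2
    rw [Finset.sum_range_succ, ← ih,
        pv_sqhalves_eval (m / 2) _ he, pv_sqhalves_eval ((m + 1) / 2) _ he1]
    rcases Nat.even_or_odd m with ⟨t, ht⟩ | ⟨t, ht⟩
    · have h1 : m / 2 = t := by omega
      have h2 : (m + 1) / 2 = t := by omega
      subst ht
      rw [h1, h2]
      push_cast
      ring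
    · have h1 : m / 2 = t := by omega
      have h2 : (m + 1) / 2 = t + 1 := by omega
      subst ht
      rw [h1, h2, Finset.sum_range_succ]
      push_cast
      ring

-- the closed-form expression B adds for one group of c copies of v starting at sorted position p
lemma pv_group (p c : Nat) (v : Int) :
    ∑ j ∈ Finset.range c, ((((p + j) / 2 : Nat) : Int) - v) ^ 2
      = (c : Int) * v * v
        - 2 * v * (pvHalves ((p : Int) + (c : Int)) - pvHalves (p : Int))
        + pvSqHalves ((p : Int) + (c : Int)) - pvSqHalves (p : Int) := by
  have hc : ((p : Int) + (c : Int)) = ((p + c : Nat) : Int) := by push_cast; ring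
  rw [hc, pv_halves_closed, pv_halves_closed, pv_sqhalves_closed, pv_sqhalves_closed,
      Finset.sum_range_add, Finset.sum_range_add]
  have hsq : ∀ j ∈ Finset.range c, ((((p + j) / 2 : Nat) : Int) - v) ^ 2
      = (((p + j) / 2 : Nat) : Int) ^ 2 - 2 * v * (((p + j) / 2 : Nat) : Int) + v ^ 2 := by
    intro j _; ring
  rw [Finset.sum_congr rfl hsq, Finset.sum_add_distrib, Finset.sum_sub_distrib,
      ← Finset.mul_sum, Finset.sum_const, Finset.card_range, nsmul_eq_mul]
  ring

-- recursive form of B's grouped sum (proof-only helper)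
def pvGroupSum (l : List Int) : List Int → Nat → Int
  | [], _ => 0
  | v :: gs, p0 =>
      (∑ j ∈ Finset.range (l.count v), ((((p0 + j) / 2 : Nat) : Int) - v) ^ 2)
        + pvGroupSum l gs (p0 + l.count v)

lemma pv_fold_groups (l : List Int) : ∀ (gs : List Int) (e : Int) (p0 : Nat),
    gs.foldl
      (fun (st : Int × Int) v =>
        (st.1 + (l.count v : Int) * v * v
            - 2 * v * (pvHalves (st.2 + (l.count v : Int)) - pvHalves st.2)
            + pvSqHalves (st.2 + (l.count v : Int)) - pvSqHalves st.2,
         st.2 + (l.count v : Int))) (e, (p0 : Int))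
    = (e + pvGroupSum l gs p0, ((p0 + (gs.map (fun v => l.count v)).sum : Nat) : Int)) := by
  intro gs
  induction gs with
  | nil => intro e p0; simp [pvGroupSum]
  | cons v gs ih =>
    intro e p0
    rw [List.foldl_cons]
    have hc : (p0 : Int) + (l.count v : Int) = ((p0 + l.count v : Nat) : Int) := by push_cast; ring
    rw [hc, ih]
    simp only [pvGroupSum, List.map_cons, List.sum_cons, Prod.mk.injEq]
    constructor
    · rw [pv_group p0 (l.count v) v]
      push_cast
      ring
    · congr 1
      omega

-- pvGroupSum is the per-position squared-error sum over the flattened groups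
lemma pv_groupSum_flat (l : List Int) : ∀ (gs : List Int) (p0 : Nat),
    pvGroupSum l gs p0
      = ∑ j ∈ Finset.range (gs.flatMap (fun v => List.replicate (l.count v) v)).length,
          ((((p0 + j) / 2 : Nat) : Int)
            - (gs.flatMap (fun v => List.replicate (l.count v) v)).getD j 0) ^ 2 := by
  intro gs
  induction gs with
  | nil => intro p0; simp [pvGroupSum]
  | cons v gs ih =>
    intro p0
    simp only [pvGroupSum, List.flatMap_cons, List.length_append, List.length_replicate]
    rw [Finset.sum_range_add, ih (p0 + l.count v)]
    congr 1
    · apply Finset.sum_congr rfl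
      intro j hj
      rw [Finset.mem_range] at hj
      rw [List.getD_eq_getElem?_getD, List.getElem?_append_left (by simpa using hj),
          List.getElem?_eq_getElem (by simpa using hj)]
      simp
    · apply Finset.sum_congr rfl
      intro j _
      have h1 : p0 + (l.count v + j) = p0 + l.count v + j := by omega
      have h2 : (List.replicate (l.count v) v ++ gs.flatMap (fun w => List.replicate (l.count w) w)).getD
            (l.count v + j) 0
          = (gs.flatMap (fun w => List.replicate (l.count w) w)).getD j 0 := by
        rw [List.getD_eq_getElem?_getD, List.getElem?_append_right (by simp),
            List.getD_eq_getElem?_getD]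
        simp
      rw [h1, h2]

lemma pv_count_flat (l : List Int) : ∀ (gs : List Int), gs.Nodup → ∀ (x : Int),
    (gs.flatMap (fun v => List.replicate (l.count v) v)).count x
      = if x ∈ gs then l.count x else 0 := by
  intro gs
  induction gs with
  | nil => intro _ x; simp
  | cons v gs ih =>
    intro hnd x
    have hnd' := List.nodup_cons.mp hnd
    rw [List.flatMap_cons, List.count_append, ih hnd'.2 x, List.count_replicate]
    by_cases hx : x = v
    · subst hx
      simp [hnd'.1]
    · simp [hx, Ne.symm hx]

lemma pv_pairwise_flat (l : List Int) : ∀ (gs : List Int), gs.Pairwise (· < ·) →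
    (gs.flatMap (fun v => List.replicate (l.count v) v)).Pairwise (· ≤ ·) := by
  intro gs
  induction gs with
  | nil => intro _; simp
  | cons v gs ih =>
    intro hp
    have hp' := List.pairwise_cons.mp hp
    rw [List.flatMap_cons, List.pairwise_append]
    refine ⟨List.pairwise_replicate.mpr (Or.inr le_rfl), ih hp'.2, ?_⟩
    intro a ha b hb
    have hav : a = v := List.eq_of_mem_replicate ha
    obtain ⟨w, hw, hbw⟩ := List.mem_flatMap.mp hb
    have hbw' : b = w := List.eq_of_mem_replicate hbw
    rw [hav, hbw']
    exact le_of_lt (hp'.1 w hw)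

-- sorted(l) is the concatenation of count-many copies of each distinct value in increasing order
lemma pv_sorted_eq_flat (l : List Int) :
    PySem.List.sorted l (fun x => x) false
      = (PySem.List.sorted (PySem.Set.ofList l) (fun x => x) false).flatMap
          (fun v => List.replicate (l.count v) v) := by
  set ks := PySem.List.sorted (PySem.Set.ofList l) (fun x => x) false with hks
  have hksnd : ks.Nodup :=
    ((PySem.List.sorted_perm (PySem.Set.ofList l) _ _).nodup_iff).mpr (PySem.Set.nodup_ofList l)
  have hmem : ∀ x : Int, x ∈ ks ↔ x ∈ l := by
    intro x
    rw [hks, PySem.List.mem_sorted]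
    exact PySem.Set.mem_ofList l x
  apply PySem.List.sorted_id_eq_of_perm_of_pairwise
  · rw [List.perm_iff_count]
    intro x
    rw [pv_count_flat l ks hksnd x]
    by_cases hx : x ∈ ks
    · simp [hx]
    · have : x ∉ l := fun h => hx ((hmem x).mpr h)
      simp [hx, List.count_eq_zero_of_not_mem this]
  · exact pv_pairwise_flat l ks (PySem.List.sorted_ofList_pairwise_lt l)

-- the two sides agree for nonnegative k = n with n ≤ len opt
lemma pv_main (n : Nat) (opt : List Int) (hn : n ≤ opt.length) :
    burger_opt (n : Int) opt = burger_opt_alt (n : Int) opt := by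
  -- names for the intermediate data
  have hbuild : (PySem.List.pyRange 0 (n : Int) 1).foldl
      (fun r i => r ++ [(PySem.List.pyGetD opt i 0, i)]) ([] : List (Int × Int))
      = (List.range n).map (fun j => (opt.getD j 0, (j : Int))) := by
    rw [PySem.List.pyRange_zero_natCast, List.foldl_map,
        PySem.List.foldl_append_singleton_eq_map (fun (j : Nat) => (PySem.List.pyGetD opt (j : Int) 0, (j : Int)))]
    simp [PySem.List.pyGetD_natCast]
  set rank0 : List (Int × Int) := (List.range n).map (fun j => (opt.getD j 0, (j : Int))) with hrank0
  set rl : List (Int × Int) := PySem.List.sorted2 rank0 (fun p => p.1) (fun p => p.2) false with hrl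
  have hlex : rl = PySem.List.sorted rank0 (fun p => toLex (p.1, p.2)) false :=
    pv_sorted2_lex rank0 _ _
  have hperm : rl.Perm rank0 := PySem.List.sorted2_perm rank0 _ _ _
  have hlen : rl.length = n := by rw [hperm.length_eq, hrank0]; simp
  have helem : ∀ p, p < n → ∃ j, j < n ∧ rl.getD p (0, 0) = (opt.getD j 0, (j : Int)) := by
    intro p hp
    have hmem : rl.getD p (0, 0) ∈ rl := by
      rw [List.getD_eq_getElem?_getD, List.getElem?_eq_getElem (by omega : p < rl.length)]
      exact List.getElem_mem _
    have := hperm.mem_iff.mp hmem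
    rw [hrank0] at this
    simp only [List.mem_map, List.mem_range] at this
    obtain ⟨j, hj, hje⟩ := this
    exact ⟨j, hj, hje.symm⟩
  have hsnd0 : ∀ q ∈ rl, 0 ≤ q.2 := by
    intro q hq
    have := hperm.mem_iff.mp hq
    rw [hrank0] at this
    simp only [List.mem_map, List.mem_range] at this
    obtain ⟨j, _, hje⟩ := this
    rw [← hje]
    exact Int.natCast_nonneg j
  have hpairfst : (rl.map (fun q => q.1)).Pairwise (· ≤ ·) := by
    rw [hlex]
    refine List.Pairwise.map _ ?_ (PySem.List.sorted_pairwise rank0 _)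
    intro a b hab
    rcases Prod.Lex.le_iff.mp hab with h | h
    · simpa using le_of_lt h
    · simpa using le_of_eq h.1
  have hfsteq : rank0.map (fun q => q.1) = opt.take n := by
    rw [hrank0, List.map_map]
    exact pv_take_eq_map_getD opt n hn
  have hfstperm : (rl.map (fun q => q.1)).Perm (opt.take n) := by
    rw [← hfsteq]; exact hperm.map _
  have hs : PySem.List.sorted (opt.take n) (fun x => x) false = rl.map (fun q => q.1) :=
    PySem.List.sorted_id_eq_of_perm_of_pairwise _ _ hfstperm hpairfst
  set d0 : List Int := List.replicate n 0 with hd0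
  set Dn : List Int := (List.range n).foldl
      (fun d p => d.set (rl.getD p (0, 0)).2.toNat ((p / 2 : Nat) : Int)) d0 with hDn
  have hA : burger_opt (n : Int) opt = cal_err Dn opt := by
    simp only [burger_opt, hbuild, ← hrl]
    rw [show PySem.Int.floordiv (n : Int) 2 = ((n / 2 : Nat) : Int) from
          by exact_mod_cast PySem.Int.floordiv_natCast n 2,
        PySem.List.pyRange_zero_natCast, List.foldl_map,
        PySem.List.pyRepeat_singleton, Int.toNat_natCast, ← hd0,
        pv_loop rl hsnd0 (n / 2) d0 (by omega)]
    by_cases hodd : n % 2 = 1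
    · rw [if_pos (show ((2 * (n / 2) : Nat) : Int) < (n : Int) by omega)]
      have hmem : rl.getD (2 * (n / 2)) (0, 0) ∈ rl := by
        rw [List.getD_eq_getElem?_getD, List.getElem?_eq_getElem (by omega : 2 * (n / 2) < rl.length)]
        exact List.getElem_mem _
      rw [PySem.List.pyGetD_natCast, PySem.List.pySetD_of_nonneg _ _ (hsnd0 _ hmem),
          show (n : Int) - 1 = ((n - 1 : Nat) : Int) by omega,
          show PySem.Int.floordiv ((n - 1 : Nat) : Int) 2 = (((n - 1) / 2 : Nat) : Int) from
            by exact_mod_cast PySem.Int.floordiv_natCast (n - 1) 2]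
      have hsplit : List.range n = List.range (2 * (n / 2)) ++ [2 * (n / 2)] := by
        rw [← List.range_succ]; congr 1; omega
      rw [hDn, hsplit, List.foldl_append, List.foldl_cons, List.foldl_nil]
      congr 2
      omega
    · rw [if_neg (show ¬ ((2 * (n / 2) : Nat) : Int) < (n : Int) by omega)]
      conv_rhs => rw [hDn, show List.range n = List.range (2 * (n / 2)) from by congr 1; omega]
  set v : List (Nat × Int) := (List.range n).map
      (fun p => ((rl.getD p (0, 0)).2.toNat, ((p / 2 : Nat) : Int))) with hv
  have hDv : Dn = v.foldl (fun d q => d.set q.1 q.2) d0 := by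
    rw [hDn, hv, List.foldl_map]
  have hlenD : Dn.length = n := by rw [hDv, pv_foldl_set_length, hd0, List.length_replicate]
  have hcal : cal_err Dn opt
      = ((List.range n).map (fun i => (Dn.getD i 0 - opt.getD i 0) ^ 2)).sum := by
    rw [cal_err, PySem.List.len_eq, hlenD, PySem.List.pyRange_zero_natCast, List.foldl_map,
        PySem.List.foldl_add]
    simp [PySem.List.pyGetD_natCast]
  have hvnodup : (v.map Prod.fst).Nodup := by
    rw [hv, List.map_map]
    have e1 : ((List.range n).map
          (Prod.fst ∘ fun p => ((rl.getD p (0, 0)).2.toNat, ((p / 2 : Nat) : Int))))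
        = rl.map (fun q => q.2.toNat) := by
      rw [show List.range n = List.range rl.length from by rw [hlen]]
      exact pv_map_getD_range rl (0, 0) (fun q => q.2.toNat)
    rw [e1]
    have hperm2 : (rl.map (fun q => q.2.toNat)).Perm (rank0.map (fun q => q.2.toNat)) :=
      hperm.map _
    have e2 : rank0.map (fun q => q.2.toNat) = List.range n := by
      rw [hrank0, List.map_map]; simp [Function.comp_def]
    rw [hperm2.nodup_iff, e2]
    exact List.nodup_range
  have hvcond : ∀ q ∈ v, q.1 < n ∧ d0.getD q.1 0 = 0 := by
    intro q hq
    rw [hv] at hq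
    simp only [List.mem_map, List.mem_range] at hq
    obtain ⟨p, hp, rfl⟩ := hq
    obtain ⟨j, hj, hje⟩ := helem p hp
    rw [List.getD_eq_getElem?_getD] at hje
    refine ⟨by simp [hje]; omega, ?_⟩
    rw [hd0]
    exact List.getD_replicate 0 (by simp [hje]; omega)
  have hscat := pv_scatter opt n v d0 (by rw [hd0]; simp) hvnodup hvcond
  rw [← hDv] at hscat
  -- B's side: counter + grouped closed forms = the rank/2 squared-error sum over the sorted values
  have hB : burger_opt_alt (n : Int) opt
      = ((List.range n).map
          (fun p => (((p / 2 : Nat) : Int) - (rl.getD p (0, 0)).1) ^ 2)).sum := by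
    simp only [burger_opt_alt]
    rw [show max (0 : Int) (n : Int) = ((n : Nat) : Int) from
          max_eq_right (Int.natCast_nonneg n),
        PySem.List.slice_to_natCast opt n,
        PySem.Dict.foldl_insert_getD_add_one_eq_counter,
        PySem.Dict.keys_counter]
    simp only [PySem.Dict.getD_counter]
    rw [show ((0 : Int), (0 : Int)) = ((0 : Int), ((0 : Nat) : Int)) from by norm_num,
        pv_fold_groups (opt.take n)
          (PySem.List.sorted (PySem.Set.ofList (opt.take n)) (fun x => x) false) 0 0]
    rw [pv_groupSum_flat, ← pv_sorted_eq_flat, hs]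
    have hlenmap : (rl.map (fun q => q.1)).length = n := by simp [hlen]
    rw [hlenmap]
    have hb : ∀ (g : Nat → Int), ((List.range n).map g).sum = ∑ j ∈ Finset.range n, g j :=
      fun g => rfl
    rw [hb]
    rw [zero_add]
    dsimp only
    apply Finset.sum_congr rfl
    intro p hp
    rw [Finset.mem_range] at hp
    rw [show 0 + p = p from by omega,
        List.getD_eq_getElem?_getD,
        List.getElem?_eq_getElem (show p < (rl.map (fun q => q.1)).length from by simp [hlen]; omega),
        List.getElem_map,
        List.getD_eq_getElem?_getD (l := rl),
        List.getElem?_eq_getElem (show p < rl.length from by omega)]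
    simp only [Option.getD_some]
  have h0 : ((List.range n).map (fun i => (d0.getD i 0 - opt.getD i 0) ^ 2)).sum
      = ((List.range n).map (fun p => ((rl.getD p (0, 0)).1) ^ 2)).sum := by
    have e1 : (List.range n).map (fun i => (d0.getD i 0 - opt.getD i 0) ^ 2)
        = ((List.range n).map (fun i => opt.getD i 0)).map (fun x => x ^ 2) := by
      rw [List.map_map]
      apply List.map_congr_left
      intro i hi
      rw [List.mem_range] at hi
      simp only [Function.comp_apply]
      rw [hd0, List.getD_replicate 0 hi]
      ring
    have e5 : (List.range n).map (fun p => ((rl.getD p (0, 0)).1) ^ 2)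
        = rl.map (fun q => q.1 ^ 2) := by
      rw [show List.range n = List.range rl.length from by rw [hlen]]
      exact pv_map_getD_range rl (0, 0) (fun q => q.1 ^ 2)
    rw [e1, e5, pv_take_eq_map_getD opt n hn]
    rw [((hfstperm.map (fun x => x ^ 2)).symm).sum_eq, List.map_map]
    rfl
  have hvsum : (v.map (fun q => (q.2 - opt.getD q.1 0) ^ 2 - (opt.getD q.1 0) ^ 2)).sum
      = ((List.range n).map
          (fun p => (((p / 2 : Nat) : Int) - (rl.getD p (0, 0)).1) ^ 2
                    - ((rl.getD p (0, 0)).1) ^ 2)).sum := by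
    rw [hv, List.map_map]
    congr 1
    apply List.map_congr_left
    intro p hp
    rw [List.mem_range] at hp
    obtain ⟨j, hj, hje⟩ := helem p hp
    rw [List.getD_eq_getElem?_getD] at hje
    simp [Function.comp, hje]
  rw [hA, hcal, hscat, hB, h0, hvsum, ← PySem.List.sum_map_add_int]
  congr 1
  apply List.map_congr_left
  intro p _
  ring

-- ===== VERDICT (by name: the statement is the Claim_ definition above) =====
theorem burger_opt_spec : Claim_equal_burger_opt := by
  intro k opt _ hpre
  unfold Spec_burger_opt
  by_cases hk0 : k < 0
  · have h0 : PySem.List.pyRange 0 k 1 = [] := pv_pyRange_neg k hk0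
    have h2 : PySem.List.pyRange 0 (PySem.Int.floordiv k 2) 1 = [] := by
      apply pv_pyRange_neg
      rw [PySem.Int.floordiv_lt_iff_lt_mul (by omega : (0:Int) < 2)]; omega
    have hAside : burger_opt k opt = 0 := by
      simp only [burger_opt, cal_err, h0, h2, List.foldl_nil,
        PySem.List.pyRepeat_singleton, Int.toNat_of_nonpos hk0.le, List.replicate_zero,
        if_neg (show ¬ ((0:Int) < k) by omega), PySem.List.len_eq, List.length_nil,
        Nat.cast_zero]
      rfl
    have hBside : burger_opt_alt k opt = 0 := by
      simp only [burger_opt_alt,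
        show max (0 : Int) k = 0 from max_eq_left hk0.le,
        PySem.List.slice_to opt (le_refl (0 : Int))]
      rfl
    rw [hAside, hBside]
  · obtain ⟨n, rfl⟩ : ∃ n : Nat, k = (n : Int) := ⟨k.toNat, by omega⟩
    have hn : n ≤ opt.length := by
      unfold Pre_burger_opt at hpre
      rw [PySem.List.len_eq] at hpre
      omega
    exact pv_main n opt hn
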